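-- pv_equiv track=rewrite | github.com/RedTurtle/redturtle.importer.rer | src/redturtle/importer/rer/browser/rer_custom_constructor.py | fix_image_url_in_tiny
-- ===== SOURCE A (Python) =====
-- def fix_image_url_in_tiny(text):
--     for size in ['big', 'newshome', 'maxi', 'custom', 'micro']:
--         if ('/image_{0}'.format(size)) in text:
--             # print "UPDATE: %s (%s) %s" % (brain.getPath(), brain.portal_type, size)
--             # TODO: regexp ?
--             text = text.replace(
--                 '/image_{0}'.format(size),
--                 '/@@images/image/{0}'.format(size)
--             )
--     return text
-- ===== SOURCE B (Python) =====
-- def fix_image_url_in_tiny(text):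
--     sizes = ('big', 'newshome', 'maxi', 'custom', 'micro')
--     parts = []
--     i = 0
--     n = len(text)
--     while i < n:
--         if text.startswith('/image_', i):
--             for size in sizes:
--                 if text.startswith(size, i + 7):
--                     parts.append('/@@images/image/' + size)
--                     i += 7 + len(size)
--                     break
--             else:
--                 parts.append(text[i])
--                 i += 1
--         else:
--             parts.append(text[i])
--             i += 1
--     return ''.join(parts)
-- ===== Notes on version B (the rewrite author's own statement) =====
-- stated objective: alternative
-- what changed: Replaces the five sequential guarded str.replace passes (each rescanning the whole text) with a single explicit left-to-right scan that checks the image-size prefix once per position and emits the rewritten URL in one pass.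
import Mathlib
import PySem

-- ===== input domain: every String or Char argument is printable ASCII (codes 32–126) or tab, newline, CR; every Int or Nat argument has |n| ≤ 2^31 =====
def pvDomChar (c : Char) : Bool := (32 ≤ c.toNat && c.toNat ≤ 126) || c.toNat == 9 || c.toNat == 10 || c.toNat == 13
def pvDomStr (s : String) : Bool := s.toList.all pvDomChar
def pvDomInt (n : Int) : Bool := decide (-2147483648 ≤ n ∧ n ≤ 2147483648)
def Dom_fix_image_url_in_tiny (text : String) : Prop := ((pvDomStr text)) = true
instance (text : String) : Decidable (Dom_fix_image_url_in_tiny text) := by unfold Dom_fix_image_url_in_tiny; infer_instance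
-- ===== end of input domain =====

-- B replaces A's five sequential guarded str.replace passes by one left-to-right scan over the text; alternative (same result, one pass).


-- ===== PORT A =====
-- A: for each size in order, if '/image_<size>' occurs, replace all its occurrences.
def fix_image_url_in_tiny (text : String) : String :=
  ["big", "newshome", "maxi", "custom", "micro"].foldl
    (fun t size =>
      if PySem.Str.isIn ("/image_" ++ size) t then
        PySem.Str.replace t ("/image_" ++ size) ("/@@images/image/" ++ size)
      else t)
    text

-- ===== PORT B =====
-- B (Source B): one left-to-right scan; the list argument is the unprocessed suffix (Source B's index i).
def pvAltSizes : List (List Char) :=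
  ["big", "newshome", "maxi", "custom", "micro"].map String.toList

def pvAltGo : List Char → List Char
  | [] => []
  | c :: t =>
    if PySem.Chars.startswith (c :: t) "/image_".toList then
      match pvAltSizes.find? (fun sz => PySem.Chars.startswith ((c :: t).drop 7) sz) with
      | some sz => "/@@images/image/".toList ++ sz ++ pvAltGo ((c :: t).drop (7 + sz.length))
      | none => c :: pvAltGo t
    else c :: pvAltGo t
termination_by l => l.length
decreasing_by all_goals (simp; try omega)

def fix_image_url_in_tiny_alt (text : String) : String :=
  String.ofList (pvAltGo text.toList)

-- ===== PRECONDITION & SPEC =====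
def Spec_fix_image_url_in_tiny (text : String) (out : String) : Prop := out = fix_image_url_in_tiny_alt text
instance (text : String) (out : String) : Decidable (Spec_fix_image_url_in_tiny text out) := by unfold Spec_fix_image_url_in_tiny; infer_instance

-- ===== CLAIM (what is proved, stated in full; the proofs are below) =====
def Claim_equal_fix_image_url_in_tiny : Prop := ∀ (text : String), Dom_fix_image_url_in_tiny text → Spec_fix_image_url_in_tiny text (fix_image_url_in_tiny text)

-- ===== LEMMAS AND PROOFS =====

-- Scan characterization of Python's str.replace (left-to-right, non-overlapping), for old ≠ [].
def pvRep (old nw : List Char) : List Char → List Char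
  | [] => []
  | c :: t =>
    if old.isPrefixOf (c :: t) then nw ++ pvRep old nw (t.drop (old.length - 1))
    else c :: pvRep old nw t
termination_by l => l.length
decreasing_by all_goals (simp; try omega)

def pvTok (sz : String) : List Char := "/image_".toList ++ sz.toList
def pvNewC (sz : String) : List Char := "/@@images/image/".toList ++ sz.toList
def pvR (sz : String) : List Char → List Char := pvRep (pvTok sz) (pvNewC sz)
def pvRepA (l : List Char) : List Char :=
  pvR "micro" (pvR "custom" (pvR "maxi" (pvR "newshome" (pvR "big" l))))

lemma pvRep_go (old nw : List Char) (h : old ≠ []) :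
    ∀ (fuel : Nat) (l acc : List Char), l.length ≤ fuel →
      PySem.Chars.replace.go old nw fuel l acc = acc.reverse ++ pvRep old nw l := by
  intro fuel
  induction fuel with
  | zero =>
    intro l acc hl
    have hnil : l = [] := List.eq_nil_of_length_eq_zero (Nat.le_zero.mp hl)
    subst hnil
    simp [PySem.Chars.replace.go, pvRep]
  | succ n ih =>
    intro l acc hl
    cases l with
    | nil => simp [PySem.Chars.replace.go, pvRep]
    | cons c t =>
      obtain ⟨o, old', rfl⟩ := List.exists_cons_of_ne_nil h
      rw [PySem.Chars.replace.go]
      by_cases hp : (o :: old').isPrefixOf (c :: t)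
      · rw [if_pos hp]
        rw [ih _ _ (by simp at hl ⊢; omega)]
        rw [pvRep, if_pos hp]
        simp
      · rw [if_neg hp]
        rw [ih _ _ (by simp at hl ⊢; omega)]
        rw [pvRep, if_neg hp]
        simp

lemma pvReplace_eq_rep (old nw : List Char) (h : old ≠ []) (s : List Char) :
    PySem.Chars.replace s old nw = pvRep old nw s := by
  unfold PySem.Chars.replace
  rw [if_neg (by simpa using h)]
  simpa using pvRep_go old nw h s.length s [] le_rfl

lemma pvRep_absent (old nw : List Char) : ∀ (s : List Char), ¬ old <:+: s → pvRep old nw s = s := by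
  intro s
  induction s with
  | nil => intro _; simp [pvRep]
  | cons c t ih =>
    intro h
    rw [pvRep, if_neg]
    · rw [ih (fun hi => h (hi.trans (List.suffix_cons c t).isInfix))]
    · intro hp
      exact h (List.isPrefixOf_iff_prefix.mp hp).isInfix

lemma pvPrefix_append_cases {l u r : List Char} (h : l <+: u ++ r) : l <+: u ∨ u <+: l := by
  rcases List.prefix_or_prefix_of_prefix h (List.prefix_append u r) with h1 | h1
  · exact Or.inl h1
  · exact Or.inr h1

lemma pvRep_skip (old nw : List Char) : ∀ (u : List Char),
    (∀ j, j < u.length → ¬ (u.drop j <+: old) ∧ ¬ (old <+: u.drop j)) →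
    ∀ r, pvRep old nw (u ++ r) = u ++ pvRep old nw r := by
  intro u
  induction u with
  | nil => intro _ r; simp
  | cons c u' ih =>
    intro h r
    have h0 := h 0 (by simp)
    simp only [List.drop_zero] at h0
    rw [List.cons_append, pvRep, if_neg]
    · rw [ih (fun j hj => by simpa [List.drop_succ_cons] using h (j+1) (by simpa using hj)) r]
      simp
    · intro hp
      have hp' : old <+: (c :: u') ++ r := by simpa using List.isPrefixOf_iff_prefix.mp hp
      rcases pvPrefix_append_cases hp' with hq | hq
      · exact h0.2 hq
      · exact h0.1 hq

lemma pvRep_match (old nw : List Char) (h : old ≠ []) (r : List Char) :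
    pvRep old nw (old ++ r) = nw ++ pvRep old nw r := by
  obtain ⟨o, old', rfl⟩ := List.exists_cons_of_ne_nil h
  rw [List.cons_append, pvRep, if_pos]
  · have hlen : ((o :: old').length - 1) = old'.length := by simp
    rw [hlen, List.drop_left]
  · exact List.isPrefixOf_iff_prefix.mpr (by rw [← List.cons_append]; exact List.prefix_append _ _)

lemma pvRep_noslash (old nw : List Char) (hn : nw.head? = some '/') :
    ∀ (n : Nat) (u : List Char), u.length ≤ n → ∀ p, '/' ∉ p →
      p <+: pvRep old nw u → p <+: u := by
  intro n
  induction n with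
  | zero =>
    intro u hu p hp hpre
    have hnil : u = [] := List.eq_nil_of_length_eq_zero (Nat.le_zero.mp hu)
    subst hnil
    simpa [pvRep] using hpre
  | succ n ih =>
    intro u hu p hp hpre
    cases u with
    | nil => simpa [pvRep] using hpre
    | cons c t =>
      rw [pvRep] at hpre
      by_cases hq : old.isPrefixOf (c :: t)
      · rw [if_pos hq] at hpre
        cases p with
        | nil => exact List.nil_prefix
        | cons q p' =>
          obtain ⟨nw', rfl⟩ : ∃ nw', nw = '/' :: nw' := by
            cases nw with
            | nil => simp at hn
            | cons a b => simp at hn; exact ⟨b, by rw [hn]⟩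
          rw [List.cons_append, List.cons_prefix_cons] at hpre
          exact absurd hpre.1 (by intro hh; exact hp (by simp [hh]))
      · rw [if_neg hq] at hpre
        cases p with
        | nil => exact List.nil_prefix
        | cons q p' =>
          rw [List.cons_prefix_cons] at hpre ⊢
          exact ⟨hpre.1, ih t (by simpa using hu) p' (fun hm => hp (by simp [hm])) hpre.2⟩

lemma pvR_skip (sz : String) (u : List Char)
    (h : ∀ j, j < u.length → ¬ (u.drop j <+: pvTok sz) ∧ ¬ (pvTok sz <+: u.drop j)) (r : List Char) :
    pvR sz (u ++ r) = u ++ pvR sz r := pvRep_skip _ _ u h r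

lemma pvR_match (sz : String) (r : List Char) :
    pvR sz (pvTok sz ++ r) = pvNewC sz ++ pvR sz r :=
  pvRep_match _ _ (by simp [pvTok]) r

lemma pvR_noslash (sz : String) (p : List Char) (hp : '/' ∉ p) (u : List Char) :
    p <+: pvR sz u → p <+: u :=
  pvRep_noslash (pvTok sz) (pvNewC sz) rfl u.length u le_rfl p hp

lemma pvStep (t sz : String) :
    (if PySem.Str.isIn ("/image_" ++ sz) t then
        PySem.Str.replace t ("/image_" ++ sz) ("/@@images/image/" ++ sz)
      else t).toList = pvR sz t.toList := by
  have htok : ("/image_" ++ sz).toList = pvTok sz := by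
    rw [String.toList_append]; rfl
  have hnew : ("/@@images/image/" ++ sz).toList = pvNewC sz := by
    rw [String.toList_append]; rfl
  have hne : pvTok sz ≠ [] := by simp [pvTok]
  by_cases h : PySem.Str.isIn ("/image_" ++ sz) t = true
  · rw [if_pos h, PySem.Str.toList_replace, htok, hnew, pvReplace_eq_rep _ _ hne]
    rfl
  · rw [if_neg h]
    have hinf : ¬ pvTok sz <:+: t.toList := by
      rw [← PySem.Chars.isIn_eq_false_iff, ← htok, ← PySem.Str.isIn_eq]
      simpa using h
    exact (pvRep_absent _ _ _ hinf).symm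

lemma pvA_eq_repA (text : String) :
    (fix_image_url_in_tiny text).toList = pvRepA text.toList := by
  unfold fix_image_url_in_tiny
  simp only [List.foldl_cons, List.foldl_nil]
  rw [pvStep, pvStep, pvStep, pvStep, pvStep]
  rfl

lemma pvAltGo_nomatch (c : Char) (t : List Char)
    (h1 : ¬ pvTok "big" <+: c :: t) (h2 : ¬ pvTok "newshome" <+: c :: t)
    (h3 : ¬ pvTok "maxi" <+: c :: t) (h4 : ¬ pvTok "custom" <+: c :: t)
    (h5 : ¬ pvTok "micro" <+: c :: t) :
    pvAltGo (c :: t) = c :: pvAltGo t := by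
  rw [pvAltGo]
  by_cases hs : PySem.Chars.startswith (c :: t) "/image_".toList
  · rw [if_pos hs]
    obtain ⟨w, hw⟩ : ∃ w, "/image_".toList ++ w = c :: t :=
      List.isPrefixOf_iff_prefix.mp (by simpa [PySem.Chars.startswith] using hs)
    have hdrop : (c :: t).drop 7 = w := by
      rw [← hw]; exact List.drop_left' rfl
    have key : ∀ szl : List Char, ¬ ("/image_".toList ++ szl) <+: c :: t →
        PySem.Chars.startswith w szl = false := by
      intro szl hns
      by_contra hc
      have hpre : szl <+: w := by
        rw [← List.isPrefixOf_iff_prefix]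
        simpa [PySem.Chars.startswith] using hc
      obtain ⟨k, rfl⟩ := hpre
      exact hns (by rw [← hw]; exact ⟨k, by simp⟩)
    have k1 := key ['b','i','g'] (by simpa [pvTok] using h1)
    have k2 := key ['n','e','w','s','h','o','m','e'] (by simpa [pvTok] using h2)
    have k3 := key ['m','a','x','i'] (by simpa [pvTok] using h3)
    have k4 := key ['c','u','s','t','o','m'] (by simpa [pvTok] using h4)
    have k5 := key ['m','i','c','r','o'] (by simpa [pvTok] using h5)
    simp [pvAltSizes, List.find?, hdrop, k1, k2, k3, k4, k5]
  · rw [if_neg hs]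

lemma pvRepA_nomatch (c : Char) (t : List Char)
    (h1 : ¬ pvTok "big" <+: c :: t) (h2 : ¬ pvTok "newshome" <+: c :: t)
    (h3 : ¬ pvTok "maxi" <+: c :: t) (h4 : ¬ pvTok "custom" <+: c :: t)
    (h5 : ¬ pvTok "micro" <+: c :: t) :
    pvRepA (c :: t) = c :: pvRepA t := by
  have step : ∀ (sz : String) (l : List Char), ¬ pvTok sz <+: c :: l →
      pvR sz (c :: l) = c :: pvR sz l := by
    intro sz l hns
    unfold pvR
    rw [pvRep, if_neg (fun hp => hns (List.isPrefixOf_iff_prefix.mp hp))]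
  have trans : ∀ (sz szp : String), '/' ∉ ("image_".toList ++ sz.toList) → ∀ l : List Char,
      ¬ pvTok sz <+: c :: l → ¬ pvTok sz <+: c :: pvR szp l := by
    intro sz szp hq l hns hp
    have hrepr : pvTok sz = '/' :: ("image_".toList ++ sz.toList) := rfl
    rw [hrepr, List.cons_prefix_cons] at hp
    exact hns (by rw [hrepr, List.cons_prefix_cons]
                  exact ⟨hp.1, pvR_noslash szp _ hq l hp.2⟩)
  unfold pvRepA
  rw [step "big" t h1]
  rw [step "newshome" _ (trans "newshome" "big" (by decide) t h2)]
  rw [step "maxi" _ (trans "maxi" "newshome" (by decide) _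
        (trans "maxi" "big" (by decide) t h3))]
  rw [step "custom" _ (trans "custom" "maxi" (by decide) _
        (trans "custom" "newshome" (by decide) _
          (trans "custom" "big" (by decide) t h4)))]
  rw [step "micro" _ (trans "micro" "custom" (by decide) _
        (trans "micro" "maxi" (by decide) _
          (trans "micro" "newshome" (by decide) _
            (trans "micro" "big" (by decide) t h5))))]

lemma pvMain : ∀ (n : Nat) (l : List Char), l.length ≤ n → pvRepA l = pvAltGo l := by
  intro n
  induction n with
  | zero =>
    intro l hl
    have hnil : l = [] := List.eq_nil_of_length_eq_zero (Nat.le_zero.mp hl)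
    subst hnil
    simp [pvRepA, pvR, pvRep, pvAltGo]
  | succ n ih =>
    intro l hl
    cases l with
    | nil => simp [pvRepA, pvR, pvRep, pvAltGo]
    | cons c t =>
      by_cases h1 : pvTok "big" <+: c :: t
      · obtain ⟨r, hr⟩ := h1
        rw [← hr] at hl ⊢
        unfold pvRepA
        rw [pvR_match "big" r,
            pvR_skip "newshome" (pvNewC "big") (by decide),
            pvR_skip "maxi" (pvNewC "big") (by decide),
            pvR_skip "custom" (pvNewC "big") (by decide),
            pvR_skip "micro" (pvNewC "big") (by decide)]
        rw [show pvR "micro" (pvR "custom" (pvR "maxi" (pvR "newshome" (pvR "big" r)))) = pvRepA r from rfl]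
        rw [ih r (by simp [pvTok] at hl; omega)]
        simp [pvTok, pvNewC, pvAltGo, pvAltSizes, PySem.Chars.startswith, List.isPrefixOf]
      · by_cases h2 : pvTok "newshome" <+: c :: t
        · obtain ⟨r, hr⟩ := h2
          rw [← hr] at hl ⊢
          unfold pvRepA
          rw [pvR_skip "big" (pvTok "newshome") (by decide),
              pvR_match "newshome",
              pvR_skip "maxi" (pvNewC "newshome") (by decide),
              pvR_skip "custom" (pvNewC "newshome") (by decide),
              pvR_skip "micro" (pvNewC "newshome") (by decide)]
          rw [show pvR "micro" (pvR "custom" (pvR "maxi" (pvR "newshome" (pvR "big" r)))) = pvRepA r from rfl]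
          rw [ih r (by simp [pvTok] at hl; omega)]
          simp [pvTok, pvNewC, pvAltGo, pvAltSizes, PySem.Chars.startswith, List.isPrefixOf]
        · by_cases h3 : pvTok "maxi" <+: c :: t
          · obtain ⟨r, hr⟩ := h3
            rw [← hr] at hl ⊢
            unfold pvRepA
            rw [pvR_skip "big" (pvTok "maxi") (by decide),
                pvR_skip "newshome" (pvTok "maxi") (by decide),
                pvR_match "maxi",
                pvR_skip "custom" (pvNewC "maxi") (by decide),
                pvR_skip "micro" (pvNewC "maxi") (by decide)]
            rw [show pvR "micro" (pvR "custom" (pvR "maxi" (pvR "newshome" (pvR "big" r)))) = pvRepA r from rfl]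
            rw [ih r (by simp [pvTok] at hl; omega)]
            simp [pvTok, pvNewC, pvAltGo, pvAltSizes, PySem.Chars.startswith, List.isPrefixOf]
          · by_cases h4 : pvTok "custom" <+: c :: t
            · obtain ⟨r, hr⟩ := h4
              rw [← hr] at hl ⊢
              unfold pvRepA
              rw [pvR_skip "big" (pvTok "custom") (by decide),
                  pvR_skip "newshome" (pvTok "custom") (by decide),
                  pvR_skip "maxi" (pvTok "custom") (by decide),
                  pvR_match "custom",
                  pvR_skip "micro" (pvNewC "custom") (by decide)]
              rw [show pvR "micro" (pvR "custom" (pvR "maxi" (pvR "newshome" (pvR "big" r)))) = pvRepA r from rfl]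
              rw [ih r (by simp [pvTok] at hl; omega)]
              simp [pvTok, pvNewC, pvAltGo, pvAltSizes, PySem.Chars.startswith, List.isPrefixOf]
            · by_cases h5 : pvTok "micro" <+: c :: t
              · obtain ⟨r, hr⟩ := h5
                rw [← hr] at hl ⊢
                unfold pvRepA
                rw [pvR_skip "big" (pvTok "micro") (by decide),
                    pvR_skip "newshome" (pvTok "micro") (by decide),
                    pvR_skip "maxi" (pvTok "micro") (by decide),
                    pvR_skip "custom" (pvTok "micro") (by decide),
                    pvR_match "micro"]
                rw [show pvR "micro" (pvR "custom" (pvR "maxi" (pvR "newshome" (pvR "big" r)))) = pvRepA r from rfl]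
                rw [ih r (by simp [pvTok] at hl; omega)]
                simp [pvTok, pvNewC, pvAltGo, pvAltSizes, PySem.Chars.startswith, List.isPrefixOf]
              · rw [pvRepA_nomatch c t h1 h2 h3 h4 h5, pvAltGo_nomatch c t h1 h2 h3 h4 h5,
                    ih t (by simpa using hl)]

-- ===== VERDICT (by name: the statement is the Claim_ definition above) =====
theorem fix_image_url_in_tiny_spec : Claim_equal_fix_image_url_in_tiny := by
  intro text _hd
  unfold Spec_fix_image_url_in_tiny fix_image_url_in_tiny_alt
  calc fix_image_url_in_tiny text
      = String.ofList (fix_image_url_in_tiny text).toList := String.ofList_toList.symm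
    _ = String.ofList (pvAltGo text.toList) := by
        rw [pvA_eq_repA, pvMain (text.toList.length) _ le_rfl]
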